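-- pv_equiv track=rewrite | github.com/AhmedRomuo/Transpostion | Transpostion_task2.py | get_num_loc
-- ===== SOURCE A (Python) =====
-- def get_num_loc(key, key_list):
--     key_sort = ""
--     i = 1
--     while i < len(key)+1:
--         for x in range(len(key)):
--             if key_list[x] == i:
--                 key_sort += str(x)
--         i += 1
--     return key_sort
-- ===== SOURCE B (Python) =====
-- def get_num_loc(key, key_list):
--     n = len(key)
--     buckets = {}
--     for x in range(n):
--         v = key_list[x]
--         if 1 <= v <= n:
--             buckets.setdefault(v, []).append(x)
--     return "".join(str(x) for v in range(1, n + 1) for x in buckets.get(v, []))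
-- ===== Notes on version B (the rewrite author's own statement) =====
-- stated objective: faster
-- what changed: Replaces A's per-value rescan of the whole list (a loop over values 1..n each doing a full pass) with a single bucketing pass into a dict keyed by value followed by one pass over the values 1..n.
import Mathlib
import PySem

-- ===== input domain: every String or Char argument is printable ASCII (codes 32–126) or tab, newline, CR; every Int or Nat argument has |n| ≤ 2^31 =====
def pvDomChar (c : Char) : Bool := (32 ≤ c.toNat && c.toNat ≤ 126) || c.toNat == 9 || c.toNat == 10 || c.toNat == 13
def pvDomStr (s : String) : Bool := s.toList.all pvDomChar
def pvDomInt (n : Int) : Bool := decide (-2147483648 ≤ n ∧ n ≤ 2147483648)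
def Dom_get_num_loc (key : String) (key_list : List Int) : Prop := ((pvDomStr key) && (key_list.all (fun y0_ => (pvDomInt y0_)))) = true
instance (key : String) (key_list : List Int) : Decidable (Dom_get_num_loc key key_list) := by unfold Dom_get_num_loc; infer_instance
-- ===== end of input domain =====

-- B replaces A's O(n^2) value-by-value rescans with one bucketing pass over the list plus one
-- pass over the values 1..n (objective: faster, asymptotic O(n^2) → O(n)).

-- ===== PORT A =====
-- literal port: outer while i in 1..len(key), inner for x in range(len(key)),
-- key_sort += str(x) when key_list[x] == i; key_list[x] via pyGetD (in range by Pre_).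
def get_num_loc (key : String) (key_list : List Int) : String :=
  let n : Int := PySem.Str.len key
  String.ofList ((PySem.List.pyRange 1 (n+1)).foldl (fun ks i =>
    (PySem.List.pyRange 0 n).foldl (fun ks x =>
      if PySem.List.pyGetD key_list x 0 = i then ks ++ PySem.Int.toChars x else ks) ks) [])

-- ===== PORT B =====
-- literal port of Source B: one pass building buckets value → list of indices
-- (setdefault(v, []).append(x) = Dict.modify v [] (· ++ [x])), then join over values 1..n.
def get_num_loc_alt (key : String) (key_list : List Int) : String :=
  let n : Int := PySem.Str.len key
  let buckets : PySem.Dict Int (List Int) :=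
    (PySem.List.pyRange 0 n).foldl (fun d x =>
      let v := PySem.List.pyGetD key_list x 0
      if 1 ≤ v ∧ v ≤ n then d.modify v [] (· ++ [x]) else d) PySem.Dict.empty
  String.ofList ((PySem.List.pyRange 1 (n+1)).flatMap (fun v =>
    (buckets.getD v []).flatMap PySem.Int.toChars))

-- ===== PRECONDITION & SPEC =====
-- A indexes key_list[x] for every x < len(key): it raises IndexError when key_list is shorter
-- than key, so exactly those inputs are excluded.
def Pre_get_num_loc (key : String) (key_list : List Int) : Prop :=
  PySem.Str.len key ≤ (key_list.length : Int)
instance (key : String) (key_list : List Int) : Decidable (Pre_get_num_loc key key_list) := by unfold Pre_get_num_loc; infer_instance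

def pvWitness_get_num_loc : String × List Int := ("ab", [2, 1])

def Spec_get_num_loc (key : String) (key_list : List Int) (out : String) : Prop := out = get_num_loc_alt key key_list
instance (key : String) (key_list : List Int) (out : String) : Decidable (Spec_get_num_loc key key_list out) := by unfold Spec_get_num_loc; infer_instance

-- ===== CLAIM (what is proved, stated in full; the proofs are below) =====
def Claim_equal_get_num_loc : Prop := ∀ (key : String) (key_list : List Int), Dom_get_num_loc key key_list → Pre_get_num_loc key key_list → Spec_get_num_loc key key_list (get_num_loc key key_list)

-- ===== LEMMAS AND PROOFS =====

-- A's inner for-loop appends str(x) for exactly the x in range(n) whose value is i.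
theorem innerA_eq (key_list : List Int) (n : Int) (ks : List Char) (i : Int) :
    (PySem.List.pyRange 0 n).foldl (fun ks x =>
      if PySem.List.pyGetD key_list x 0 = i then ks ++ PySem.Int.toChars x else ks) ks
    = ks ++ ((PySem.List.pyRange 0 n).filter
        (fun x => decide (PySem.List.pyGetD key_list x 0 = i))).flatMap PySem.Int.toChars := by
  rw [PySem.List.foldl_ite_eq_foldl_filter (fun x => PySem.List.pyGetD key_list x 0 = i)
        (fun ks x => ks ++ PySem.Int.toChars x)]
  exact PySem.List.foldl_append_eq_flatMap _ _ _

-- B's bucket at a value v in 1..n holds exactly the indices of range(n) carrying value v.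
theorem bucketB_eq (key_list : List Int) (n : Int) (v : Int) (h1 : 1 ≤ v) (h2 : v ≤ n) :
    (((PySem.List.pyRange 0 n).foldl (fun d x =>
        let w := PySem.List.pyGetD key_list x 0
        if 1 ≤ w ∧ w ≤ n then d.modify w [] (· ++ [x]) else d)
        PySem.Dict.empty).getD v [])
    = (PySem.List.pyRange 0 n).filter
        (fun x => decide (PySem.List.pyGetD key_list x 0 = v)) := by
  show ((List.foldl (fun d x =>
      if 1 ≤ PySem.List.pyGetD key_list x 0 ∧ PySem.List.pyGetD key_list x 0 ≤ n
      then d.modify (PySem.List.pyGetD key_list x 0) [] (· ++ [x]) else d)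
      PySem.Dict.empty (PySem.List.pyRange 0 n)).getD v []) = _
  have hstep : (List.foldl (fun (d : PySem.Dict Int (List Int)) x =>
      if 1 ≤ PySem.List.pyGetD key_list x 0 ∧ PySem.List.pyGetD key_list x 0 ≤ n
      then d.modify (PySem.List.pyGetD key_list x 0) [] (· ++ [x]) else d)
      PySem.Dict.empty (PySem.List.pyRange 0 n))
      = (List.foldl (fun d x => d.modify (PySem.List.pyGetD key_list x 0) [] (· ++ [x]))
        PySem.Dict.empty ((PySem.List.pyRange 0 n).filter
          (fun x => decide (1 ≤ PySem.List.pyGetD key_list x 0 ∧ PySem.List.pyGetD key_list x 0 ≤ n)))) :=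
    PySem.List.foldl_ite_eq_foldl_filter _ _ _ _
  rw [hstep]
  rw [show (List.foldl (fun d x => d.modify (PySem.List.pyGetD key_list x 0) [] (· ++ [x]))
        PySem.Dict.empty
        ((PySem.List.pyRange 0 n).filter
          (fun x => decide (1 ≤ PySem.List.pyGetD key_list x 0 ∧ PySem.List.pyGetD key_list x 0 ≤ n))))
      = (List.foldl (fun d p => d.modify p.1 [] (· ++ [p.2])) PySem.Dict.empty
        (((PySem.List.pyRange 0 n).filter
          (fun x => decide (1 ≤ PySem.List.pyGetD key_list x 0 ∧ PySem.List.pyGetD key_list x 0 ≤ n))).map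
          (fun x => (PySem.List.pyGetD key_list x 0, x))))
      from (List.foldl_map (f := fun x => (PySem.List.pyGetD key_list x 0, x)) (g := fun (d : PySem.Dict Int (List Int)) p => d.modify p.1 [] (· ++ [p.2]))).symm]
  rw [PySem.Dict.getD_foldl_modify_append]
  simp only [PySem.Dict.getD_empty, List.nil_append, List.filter_map, List.map_map,
    List.filter_filter, Function.comp]
  rw [List.filter_congr (l := PySem.List.pyRange 0 n)
    (q := fun x => decide (PySem.List.pyGetD key_list x 0 = v)) (fun x _ => by
      by_cases h : PySem.List.pyGetD key_list x 0 = v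
      · simp [h, h1, h2]
      · simp [h])]
  exact List.map_id' _

-- ===== VERDICT (by name: the statement is the Claim_ definition above) =====
theorem get_num_loc_spec : Claim_equal_get_num_loc := by
  intro key key_list _ _
  unfold Spec_get_num_loc get_num_loc get_num_loc_alt
  simp only [innerA_eq]
  rw [PySem.List.foldl_append_eq_flatMap, List.nil_append]
  congr 1
  apply List.flatMap_congr
  intro v hv
  obtain ⟨h1, h2⟩ := PySem.List.mem_pyRange_one.mp hv
  rw [bucketB_eq key_list _ v h1 (by omega)]
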